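-- pv_equiv track=rewrite | github.com/MrBrantCode/unitest_baseline | mut_generate/mist_train_taco/taco_6677/solution.py | max_lcm_of_three_numbers
-- ===== SOURCE A (Python) =====
-- from math import gcd
--
-- def max_lcm_of_three_numbers(n):
--     if n == 1:
--         return 1
--     elif n == 2:
--         return 2
--     elif n == 3:
--         return 6
--     else:
--         c = n * (n - 1)
--         k = n - 2
--         while True:
--             if gcd(k, n - 1) == 1 and gcd(k, n) == 1:
--                 break
--             k -= 1
--         d = (n - 1) * (n - 2)
--         k1 = n - 3
--         while True:
--             if gcd(k1, n - 1) == 1 and gcd(k1, n - 2) == 1: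
--                 break
--             k1 -= 1
--         return max(c * k, d * k1)
-- ===== SOURCE B (Python) =====
-- def max_lcm_of_three_numbers(n):
--     if n == 1:
--         return 1
--     if n == 2:
--         return 2
--     if n == 3:
--         return 6
--     if n % 2:
--         return n * (n - 1) * (n - 2)
--     if n % 3:
--         return n * (n - 1) * (n - 3)
--     return (n - 1) * (n - 2) * (n - 3)
-- ===== Notes on version B (the rewrite author's own statement) =====
-- stated objective: simpler
-- what changed: Replaces the two coprimality-search while loops over math.gcd with the closed-form parity/divisibility case split: n(n-1)(n-2) for odd n, n(n-1)(n-3) for even n not divisible by 3, (n-1)(n-2)(n-3) for even n divisible by 3.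
-- outside the precondition, e.g. on max_lcm_of_three_numbers(-6): A returns -462, B returns -504; on max_lcm_of_three_numbers(0): A does not finish within the time limit, B returns -6
import Mathlib
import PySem

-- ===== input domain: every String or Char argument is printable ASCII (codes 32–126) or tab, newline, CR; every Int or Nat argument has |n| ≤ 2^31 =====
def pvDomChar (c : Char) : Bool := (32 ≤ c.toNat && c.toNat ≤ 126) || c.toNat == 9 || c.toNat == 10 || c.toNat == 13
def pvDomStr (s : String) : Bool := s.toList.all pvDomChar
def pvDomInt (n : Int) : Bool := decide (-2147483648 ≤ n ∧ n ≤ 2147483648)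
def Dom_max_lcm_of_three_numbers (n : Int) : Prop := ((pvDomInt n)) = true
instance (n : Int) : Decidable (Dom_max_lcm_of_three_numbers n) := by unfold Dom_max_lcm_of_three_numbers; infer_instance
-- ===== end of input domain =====

-- B replaces A's two gcd-searching while loops with the closed-form parity/divisibility case split (simpler, no search).

-- ===== PORT A =====
-- 'while True: if gcd(k,a)==1 and gcd(k,b)==1: break; k -= 1' as fuel recursion;
-- under Pre_ (1 ≤ n) the Python loop breaks no later than k = 1, i.e. within n.toNat steps, so the fuel never runs out.
def lcmLoop (a b : Int) : Int → Nat → Int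
  | k, 0 => k
  | k, fuel+1 => if Int.gcd k a = 1 ∧ Int.gcd k b = 1 then k else lcmLoop a b (k-1) fuel

def max_lcm_of_three_numbers (n : Int) : Int :=
  if n = 1 then 1
  else if n = 2 then 2
  else if n = 3 then 6
  else
    let c := n * (n - 1)
    let k := lcmLoop (n - 1) n (n - 2) n.toNat
    let d := (n - 1) * (n - 2)
    let k1 := lcmLoop (n - 1) (n - 2) (n - 3) n.toNat
    max (c * k) (d * k1)

-- ===== PORT B =====
def max_lcm_of_three_numbers_alt (n : Int) : Int :=
  if n = 1 then 1
  else if n = 2 then 2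
  else if n = 3 then 6
  else if PySem.Int.mod n 2 ≠ 0 then n * (n - 1) * (n - 2)
  else if PySem.Int.mod n 3 ≠ 0 then n * (n - 1) * (n - 3)
  else (n - 1) * (n - 2) * (n - 3)

-- ===== PRECONDITION & SPEC =====
-- Pre_ restricts to the problem's natural domain n ≥ 1: for n = 0 A's first while loop never breaks
-- (the Python diverges), and for n < 0 A returns meaningless negative products outside the task's domain.
def Pre_max_lcm_of_three_numbers (n : Int) : Prop := 1 ≤ n
instance (n : Int) : Decidable (Pre_max_lcm_of_three_numbers n) := by unfold Pre_max_lcm_of_three_numbers; infer_instance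
def pvWitness_max_lcm_of_three_numbers : Int := 7

def Spec_max_lcm_of_three_numbers (n : Int) (out : Int) : Prop := out = max_lcm_of_three_numbers_alt n
instance (n : Int) (out : Int) : Decidable (Spec_max_lcm_of_three_numbers n out) := by unfold Spec_max_lcm_of_three_numbers; infer_instance

-- ===== CLAIM (what is proved, stated in full; the proofs are below) =====
def Claim_equal_max_lcm_of_three_numbers : Prop := ∀ (n : Int), Dom_max_lcm_of_three_numbers n → Pre_max_lcm_of_three_numbers n → Spec_max_lcm_of_three_numbers n (max_lcm_of_three_numbers n)

-- ===== LEMMAS AND PROOFS =====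

lemma lcmLoop_break {a b k : Int} {f : Nat} (h1 : Int.gcd k a = 1) (h2 : Int.gcd k b = 1) :
    lcmLoop a b k (f+1) = k := by
  simp only [lcmLoop]
  rw [if_pos ⟨h1, h2⟩]

lemma lcmLoop_step {a b k k' : Int} {f : Nat}
    (h : ¬(Int.gcd k a = 1 ∧ Int.gcd k b = 1)) (hk : k - 1 = k') :
    lcmLoop a b k (f+1) = lcmLoop a b k' f := by
  simp only [lcmLoop]
  rw [if_neg h, hk]

lemma lcmLoop_le (a b : Int) : ∀ (f : Nat) (k : Int), lcmLoop a b k f ≤ k := by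
  intro f
  induction f with
  | zero => intro k; simp [lcmLoop]
  | succ f ih =>
      intro k
      simp only [lcmLoop]
      split
      · exact le_refl _
      · exact le_trans (ih (k-1)) (by omega)

lemma gcd_consec {m b : Int} (hb : b = m + 1) : Int.gcd m b = 1 := by
  subst hb
  exact Int.isCoprime_iff_gcd_eq_one.mp ⟨-1, 1, by ring⟩

lemma gcd_two_apart {m b : Int} (h : m % 2 = 1) (hb : b = m + 2) : Int.gcd m b = 1 := by
  subst hb
  obtain ⟨t, ht⟩ : ∃ t, m = 2*t + 1 := ⟨m / 2, by omega⟩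
  exact Int.isCoprime_iff_gcd_eq_one.mp ⟨t+1, -t, by rw [ht]; ring⟩

lemma gcd_three_apart {m b : Int} (h : ¬ (3:Int) ∣ m) (hb : b = m + 3) : Int.gcd m b = 1 := by
  subst hb
  have h' : m % 3 = 1 ∨ m % 3 = 2 := by omega
  rcases h' with h' | h'
  · obtain ⟨t, ht⟩ : ∃ t, m = 3*t + 1 := ⟨m / 3, by omega⟩
    exact Int.isCoprime_iff_gcd_eq_one.mp ⟨t+1, -t, by rw [ht]; ring⟩
  · obtain ⟨t, ht⟩ : ∃ t, m = 3*t + 2 := ⟨m / 3, by omega⟩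
    exact Int.isCoprime_iff_gcd_eq_one.mp ⟨2*t+3, -(2*t+1), by rw [ht]; ring⟩

lemma gcd_ne_one {d a b : Int} (hd : 2 ≤ d) (ha : d ∣ a) (hb : d ∣ b) : Int.gcd a b ≠ 1 := by
  intro h
  obtain ⟨u, v, huv⟩ := Int.isCoprime_iff_gcd_eq_one.mpr h
  have h1 : d ∣ 1 := huv ▸ dvd_add (ha.mul_left u) (hb.mul_left v)
  have := Int.le_of_dvd one_pos h1
  omega

lemma main_odd {n : Int} (hn : 4 ≤ n) (h2 : n % 2 = 1) :
    max_lcm_of_three_numbers n = n * (n - 1) * (n - 2) := by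
  obtain ⟨f, hf⟩ : ∃ f, n.toNat = f + 4 := ⟨n.toNat - 4, by omega⟩
  unfold max_lcm_of_three_numbers
  rw [if_neg (by omega), if_neg (by omega), if_neg (by omega)]
  simp only []
  rw [hf]
  -- first loop breaks immediately at k = n - 2
  have hg1 : Int.gcd (n-2) (n-1) = 1 := gcd_consec (by ring)
  have hg2 : Int.gcd (n-2) n = 1 := gcd_two_apart (by omega) (by ring)
  have hL1 : lcmLoop (n-1) n (n-2) (f+3+1) = n - 2 := lcmLoop_break hg1 hg2
  -- second loop: first step fails (2 divides both n-3 and n-1), thereafter result ≤ n - 4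
  have hs : lcmLoop (n-1) (n-2) (n-3) (f+3+1) = lcmLoop (n-1) (n-2) (n-4) (f+3) := by
    refine lcmLoop_step ?_ (by ring)
    rintro ⟨hA, _⟩
    exact gcd_ne_one (le_refl 2) ⟨(n-3)/2, by omega⟩ ⟨(n-1)/2, by omega⟩ hA
  have hle : lcmLoop (n-1) (n-2) (n-4) (f+3) ≤ n - 4 := lcmLoop_le _ _ _ _
  rw [show f + 4 = f + 3 + 1 from rfl, hL1, hs]
  set k1 := lcmLoop (n-1) (n-2) (n-4) (f+3) with hk1
  have hpos : (0:Int) ≤ (n-1)*(n-2) := by nlinarith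
  have hmax : (n-1) * (n-2) * k1 ≤ n * (n-1) * (n-2) := by
    calc (n-1) * (n-2) * k1 = ((n-1)*(n-2)) * k1 := by ring
      _ ≤ ((n-1)*(n-2)) * (n-4) := mul_le_mul_of_nonneg_left hle hpos
      _ ≤ n * (n-1) * (n-2) := by nlinarith
  rw [max_eq_left hmax]

lemma main_even_not3 {n : Int} (hn : 4 ≤ n) (h2 : n % 2 = 0) (h3 : ¬ (3:Int) ∣ n) :
    max_lcm_of_three_numbers n = n * (n - 1) * (n - 3) := by
  obtain ⟨f, hf⟩ : ∃ f, n.toNat = f + 4 := ⟨n.toNat - 4, by omega⟩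
  unfold max_lcm_of_three_numbers
  rw [if_neg (by omega), if_neg (by omega), if_neg (by omega)]
  simp only []
  rw [hf]
  have hg1 : Int.gcd (n-3) (n-1) = 1 := gcd_two_apart (by omega) (by ring)
  have hg2 : Int.gcd (n-3) n = 1 :=
    gcd_three_apart (by rintro ⟨t, ht⟩; exact h3 ⟨t+1, by omega⟩) (by ring)
  have hg3 : Int.gcd (n-3) (n-2) = 1 := gcd_consec (by ring)
  -- first loop: k = n-2 fails (2 divides both), then breaks at n-3
  have hs1 : lcmLoop (n-1) n (n-2) (f+3+1) = lcmLoop (n-1) n (n-3) (f+3) := by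
    refine lcmLoop_step ?_ (by ring)
    rintro ⟨_, hB⟩
    exact gcd_ne_one (le_refl 2) ⟨(n-2)/2, by omega⟩ ⟨n/2, by omega⟩ hB
  obtain ⟨f', hf'⟩ : ∃ f', f + 3 = f' + 1 := ⟨f + 2, by omega⟩
  have hL1 : lcmLoop (n-1) n (n-3) (f+3) = n - 3 := by
    rw [hf']; exact lcmLoop_break hg1 hg2
  have hL2 : lcmLoop (n-1) (n-2) (n-3) (f+3+1) = n - 3 := lcmLoop_break hg1 hg3
  rw [show f + 4 = f + 3 + 1 from rfl, hs1, hL1, hL2]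
  have h13 : (0:Int) ≤ (n-1)*(n-3) := by nlinarith
  rw [max_eq_left (by nlinarith [h13])]

lemma main_even_3 {n : Int} (hn : 4 ≤ n) (h2 : n % 2 = 0) (h3 : (3:Int) ∣ n) :
    max_lcm_of_three_numbers n = (n - 1) * (n - 2) * (n - 3) := by
  have hn6 : 6 ≤ n := by omega
  obtain ⟨f, hf⟩ : ∃ f, n.toNat = f + 4 := ⟨n.toNat - 4, by omega⟩
  unfold max_lcm_of_three_numbers
  rw [if_neg (by omega), if_neg (by omega), if_neg (by omega)]
  simp only []
  rw [hf]
  obtain ⟨t, ht⟩ := h3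
  -- first loop: fails at n-2 (2 | both), n-3 (3 | both), n-4 (2 | both); result ≤ n - 5
  have hs1 : lcmLoop (n-1) n (n-2) (f+3+1) = lcmLoop (n-1) n (n-3) (f+3) := by
    refine lcmLoop_step ?_ (by ring)
    rintro ⟨_, hB⟩
    exact gcd_ne_one (le_refl 2) ⟨(n-2)/2, by omega⟩ ⟨n/2, by omega⟩ hB
  have hs2 : lcmLoop (n-1) n (n-3) (f+2+1) = lcmLoop (n-1) n (n-4) (f+2) := by
    refine lcmLoop_step ?_ (by ring)
    rintro ⟨_, hB⟩
    exact gcd_ne_one (d := 3) (by omega) ⟨t-1, by omega⟩ ⟨t, by omega⟩ hB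
  have hs3 : lcmLoop (n-1) n (n-4) (f+1+1) = lcmLoop (n-1) n (n-5) (f+1) := by
    refine lcmLoop_step ?_ (by ring)
    rintro ⟨_, hB⟩
    exact gcd_ne_one (le_refl 2) ⟨(n-4)/2, by omega⟩ ⟨n/2, by omega⟩ hB
  have hle : lcmLoop (n-1) n (n-5) (f+1) ≤ n - 5 := lcmLoop_le _ _ _ _
  -- second loop breaks immediately at n - 3
  have hg1 : Int.gcd (n-3) (n-1) = 1 := gcd_two_apart (by omega) (by ring)
  have hg3 : Int.gcd (n-3) (n-2) = 1 := gcd_consec (by ring)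
  have hL2 : lcmLoop (n-1) (n-2) (n-3) (f+3+1) = n - 3 := lcmLoop_break hg1 hg3
  rw [show f + 4 = f + 3 + 1 from rfl, hs1, show f + 3 = f + 2 + 1 from rfl, hs2,
      show f + 2 = f + 1 + 1 from rfl, hs3, hL2]
  set k := lcmLoop (n-1) n (n-5) (f+1) with hk
  have hpos : (0:Int) ≤ n*(n-1) := by nlinarith
  have hmax : n * (n-1) * k ≤ (n-1) * (n-2) * (n-3) := by
    calc n * (n-1) * k = (n*(n-1)) * k := by ring
      _ ≤ (n*(n-1)) * (n-5) := mul_le_mul_of_nonneg_left hle hpos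
      _ ≤ (n-1) * (n-2) * (n-3) := by nlinarith
  rw [max_eq_right hmax]

-- ===== VERDICT (by name: the statement is the Claim_ definition above) =====
theorem max_lcm_of_three_numbers_spec : Claim_equal_max_lcm_of_three_numbers := by
  intro n _ hpre
  unfold Spec_max_lcm_of_three_numbers
  unfold Pre_max_lcm_of_three_numbers at hpre
  by_cases h1 : n = 1
  · subst h1; decide
  by_cases h2 : n = 2
  · subst h2; decide
  by_cases h3 : n = 3
  · subst h3; decide
  have hn : 4 ≤ n := by omega
  have hm2 : PySem.Int.mod n 2 = n % 2 := PySem.Int.mod_eq_emod_of_pos (by norm_num)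
  have hm3 : PySem.Int.mod n 3 = n % 3 := PySem.Int.mod_eq_emod_of_pos (by norm_num)
  unfold max_lcm_of_three_numbers_alt
  rw [if_neg h1, if_neg h2, if_neg h3, hm2, hm3]
  by_cases hodd : n % 2 = 1
  · rw [if_pos (by omega)]
    exact main_odd hn hodd
  · have heven : n % 2 = 0 := by omega
    rw [if_neg (by omega)]
    by_cases hd3 : (3:Int) ∣ n
    · rw [if_neg (by omega)]
      exact main_even_3 hn heven hd3
    · rw [if_pos (by omega)]
      exact main_even_not3 hn heven hd3
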